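-- pv_equiv track=rewrite | github.com/DanielRamsgard/comp110-23f-workspace | exercises/ex06/data_utils.py | columnar
-- ===== SOURCE A (Python) =====
-- def columnar(table: list[dict[str, str]]) -> dict[str, list[str]]:
--     """Transforms table."""
--     # initial setup
--     new_dict: dict[str, list[str]] = dict()
--
--     # initialize lists
--     for row in table:
--         for key in row:
--             new_dict[key] = list()
--
--     # store columns
--     for row in table:
--         for key in row:
--             new_dict[key].append(row[key])
--
--     # return dict
--     return new_dict
-- ===== SOURCE B (Python) =====
-- def columnar(table: list[dict[str, str]]) -> dict[str, list[str]]: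
--     """Transforms table."""
--     keys = list(dict.fromkeys(k for row in table for k in row))
--     return {key: [row[key] for row in table if key in row] for key in keys}
-- ===== Notes on version B (the rewrite author's own statement) =====
-- stated objective: simpler
-- what changed: Builds the ordered key list once with dict.fromkeys and then fills each column with a key-outer/row-inner comprehension, replacing A's two row-major passes that mutate a dict in place.
import Mathlib
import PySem

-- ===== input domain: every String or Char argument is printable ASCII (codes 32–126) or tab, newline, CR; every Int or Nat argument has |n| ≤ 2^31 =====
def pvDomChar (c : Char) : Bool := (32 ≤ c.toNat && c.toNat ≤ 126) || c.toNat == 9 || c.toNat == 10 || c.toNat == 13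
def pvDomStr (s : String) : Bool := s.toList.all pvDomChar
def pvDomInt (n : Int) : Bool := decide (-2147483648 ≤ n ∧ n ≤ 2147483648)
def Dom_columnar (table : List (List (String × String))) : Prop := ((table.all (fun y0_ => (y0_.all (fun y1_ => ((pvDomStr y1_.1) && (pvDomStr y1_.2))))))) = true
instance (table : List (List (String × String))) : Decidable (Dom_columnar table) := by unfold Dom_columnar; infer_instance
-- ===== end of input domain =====

-- B fills each column with a key-outer/row-inner pass over a precomputed key list; A mutates a dict row-major. Objective: simpler.

-- ===== PORT A =====
-- each 'row' is a Python dict, so its association list carries one pair per key;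
-- 'for key in row' together with 'row[key]' is therefore a pass over the row's pairs.
def columnar (table : List (List (String × String))) : List (String × List String) :=
  let d0 : PySem.Dict String (List String) := PySem.Dict.empty
  -- initialize lists
  let d1 := table.foldl (fun d row => row.foldl (fun d p => d.insert p.1 ([] : List String)) d) d0
  -- store columns
  let d2 := table.foldl (fun d row => row.foldl (fun d p => d.modify p.1 [] (fun l => l ++ [p.2])) d) d1
  d2.items

-- ===== PORT B =====
def columnar_alt (table : List (List (String × String))) : List (String × List String) :=
  let keys := PySem.List.dedup (table.flatMap (fun row => row.map Prod.fst))
  keys.map (fun k => (k, table.filterMap (fun row => (PySem.Dict.mk row).get? k)))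

-- ===== PRECONDITION & SPEC =====
-- Pre_ restricts rows to distinct keys: each row encodes a Python dict, which cannot hold a duplicate key.
def Pre_columnar (table : List (List (String × String))) : Prop :=
  ∀ row ∈ table, (row.map Prod.fst).Nodup
instance (table : List (List (String × String))) : Decidable (Pre_columnar table) := by unfold Pre_columnar; infer_instance
def pvWitness_columnar : (List (List (String × String))) :=
  [[("a", "1"), ("b", "2")], [("b", "3"), ("c", "4")], [("a", "5")]]
def Spec_columnar (table : List (List (String × String))) (out : List (String × List String)) : Prop := out = columnar_alt table
instance (table : List (List (String × String))) (out : List (String × List String)) : Decidable (Spec_columnar table out) := by unfold Spec_columnar; infer_instance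

-- ===== CLAIM (what is proved, stated in full; the proofs are below) =====
def Claim_equal_columnar : Prop := ∀ (table : List (List (String × String))), Dom_columnar table → Pre_columnar table → Spec_columnar table (columnar table)

-- ===== LEMMAS AND PROOFS =====

-- nested fold over rows = fold over the flattened pair list
lemma foldl_foldl_flatten {α β : Type} (g : β → α → β) (table : List (List α)) (d : β) :
    table.foldl (fun d row => row.foldl g d) d = table.flatten.foldl g d := by
  induction table generalizing d with
  | nil => rfl
  | cons r t ih => simp [List.foldl_append, ih]

-- phase 1 leaves every column empty
lemma getD_foldl_insert_nil (l : List (String × String)) (d : PySem.Dict String (List String))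
    (h : ∀ k, d.getD k [] = []) (k : String) :
    (l.foldl (fun d p => d.insert p.1 ([] : List String)) d).getD k [] = [] := by
  induction l generalizing d with
  | nil => exact h k
  | cons p t ih =>
      refine ih _ (fun k' => ?_)
      rw [PySem.Dict.getD_insert]
      split <;> simp [h]

-- one row with distinct keys contributes its (unique) match for k
lemma row_filter_eq_get? (row : List (String × String)) (k : String)
    (h : (row.map Prod.fst).Nodup) :
    (row.filter (fun p => p.1 == k)).map Prod.snd =
      ((PySem.Dict.mk row).get? k).toList := by
  induction row with
  | nil => simp [PySem.Dict.get?]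
  | cons p t ih =>
      simp only [List.map_cons, List.nodup_cons] at h
      rw [PySem.Dict.get?_mk_cons]
      by_cases hk : p.1 = k
      · subst hk
        have : (t.filter (fun q => q.1 == p.1)).map Prod.snd = [] := by
          rw [List.filter_eq_nil_iff.mpr, List.map_nil]
          intro q hq hbeq
          have hq1 : q.1 = p.1 := by simpa using hbeq
          exact h.1 (hq1 ▸ List.mem_map_of_mem hq)
        simp [this]
      · simp only [List.filter_cons]
        have hbeq : (p.1 == k) = false := by simpa using hk
        simp [hbeq, ih h.2]

-- the flattened filter for k equals B's column for k
lemma flatten_filter_eq_filterMap (table : List (List (String × String)))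
    (hnd : ∀ row ∈ table, (row.map Prod.fst).Nodup) (k : String) :
    (table.flatten.filter (fun p => p.1 == k)).map Prod.snd =
      table.filterMap (fun row => (PySem.Dict.mk row).get? k) := by
  induction table with
  | nil => rfl
  | cons r t ih =>
      simp only [List.flatten_cons, List.filter_append, List.map_append]
      rw [row_filter_eq_get? r k (hnd r (by simp)), ih (fun row hr => hnd row (by simp [hr]))]
      rw [List.filterMap_cons]
      cases hg : (PySem.Dict.mk r).get? k <;> simp

-- ===== VERDICT (by name: the statement is the Claim_ definition above) =====
theorem columnar_spec : Claim_equal_columnar := by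
  intro table _ hpre
  unfold Spec_columnar columnar columnar_alt
  simp only []
  rw [foldl_foldl_flatten, foldl_foldl_flatten]
  set pairs := table.flatten with hpairs
  set d1 := pairs.foldl (fun d p => d.insert p.1 ([] : List String)) PySem.Dict.empty with hd1
  set d2 := pairs.foldl (fun d p => d.modify p.1 [] (fun l => l ++ [p.2])) d1 with hd2
  have hk1 : d1.keys = PySem.Set.update (PySem.Dict.empty : PySem.Dict String (List String)).keys (pairs.map Prod.fst) := by
    rw [hd1]; exact PySem.Dict.keys_foldl_insert_key pairs Prod.fst _ _
  have hk1' : d1.keys = PySem.List.dedup (pairs.map Prod.fst) := by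
    rw [hk1]; simp [PySem.Dict.keys_empty, PySem.Set.update_nil_left]
  have hk2 : d2.keys = PySem.List.dedup (pairs.map Prod.fst) := by
    rw [hd2, PySem.Dict.keys_foldl_modify_key pairs Prod.fst _ _ _, hk1']
    rw [PySem.Set.update_eq_append_filter]
    have : (PySem.Set.ofList (pairs.map Prod.fst)).filter
        (fun y => !(PySem.Set.contains (PySem.List.dedup (pairs.map Prod.fst)) y)) = [] := by
      rw [List.filter_eq_nil_iff]
      intro a ha
      simp only [Bool.not_eq_true', Bool.not_eq_false]
      have : a ∈ PySem.List.dedup (pairs.map Prod.fst) := by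
        rw [PySem.List.dedup_eq_ofList]; exact ha
      simpa [PySem.Set.contains] using this
    simp
  have hnodup : d2.keys.Nodup := by rw [hk2]; exact PySem.List.nodup_dedup _
  have hitems := PySem.Dict.items_eq_map_keys d2 hnodup ([] : List String)
  rw [hitems, hk2]
  have hflat : table.flatMap (fun row => row.map Prod.fst) = pairs.map Prod.fst := by
    simp [hpairs, List.flatMap_def, List.map_flatten]
  rw [hflat]
  apply List.map_congr_left
  intro k hk
  congr 1
  rw [hd2, PySem.Dict.getD_foldl_modify_append]
  rw [getD_foldl_insert_nil pairs PySem.Dict.empty (by simp [PySem.Dict.getD_empty]) k]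
  rw [List.nil_append]
  exact flatten_filter_eq_filterMap table hpre k
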